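-- pv_equiv track=rewrite | github.com/AetherX-Technologies/senseFlow-live | prototype/tools/llm_json_probe.py | _select_summary
-- ===== SOURCE A (Python) =====
-- from typing import Dict, List, Optional, Tuple
--
-- def _select_summary(sentences: List[str], max_items: int = 5) -> List[str]:
--     filtered = [s for s in sentences if len(s) >= 6]
--     if not filtered:
--         filtered = sentences
--     ranked = sorted(filtered, key=len, reverse=True)
--     summary: List[str] = []
--     seen = set()
--     for sentence in ranked:
--         if sentence in seen:
--             continue
--         summary.append(sentence)
--         seen.add(sentence)
--         if len(summary) >= max_items:
--             break
--     if not summary: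
--         summary = sentences[:max_items]
--     return summary
-- ===== SOURCE B (Python) =====
-- from typing import List
--
-- def _select_summary(sentences: List[str], max_items: int = 5) -> List[str]:
--     filtered = [s for s in sentences if len(s) >= 6]
--     if not filtered:
--         filtered = sentences
--     buckets = {}
--     seen = set()
--     for s in filtered:
--         if s not in seen:
--             seen.add(s)
--             buckets.setdefault(len(s), []).append(s)
--     summary = []
--     for length in sorted(buckets, reverse=True):
--         summary.extend(buckets[length])
--     summary = summary[:max_items]
--     if not summary:
--         summary = sentences[:max_items]
--     return summary
-- ===== Notes on version B (the rewrite author's own statement) =====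
-- stated objective: alternative
-- what changed: Replaces A's sort-all-sentences-then-dedup-scan with a bucket (distribution) approach: one pass groups unseen sentences into a dict keyed by length, then only the distinct lengths are sorted descending and the buckets concatenated, with the count applied as a plain slice.
-- intended difference: For max_items <= 0 with nonempty sentences A still returns its longest unique sentence (the count check runs only after the first append); B applies the count as an ordinary slice bound (empty for 0, Python negative-slice semantics for negatives), which is what a caller asking for at most max_items items intends. — e.g. on _select_summary(["abcdef"], 0): A returns ["abcdef"], B returns []
import Mathlib
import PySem

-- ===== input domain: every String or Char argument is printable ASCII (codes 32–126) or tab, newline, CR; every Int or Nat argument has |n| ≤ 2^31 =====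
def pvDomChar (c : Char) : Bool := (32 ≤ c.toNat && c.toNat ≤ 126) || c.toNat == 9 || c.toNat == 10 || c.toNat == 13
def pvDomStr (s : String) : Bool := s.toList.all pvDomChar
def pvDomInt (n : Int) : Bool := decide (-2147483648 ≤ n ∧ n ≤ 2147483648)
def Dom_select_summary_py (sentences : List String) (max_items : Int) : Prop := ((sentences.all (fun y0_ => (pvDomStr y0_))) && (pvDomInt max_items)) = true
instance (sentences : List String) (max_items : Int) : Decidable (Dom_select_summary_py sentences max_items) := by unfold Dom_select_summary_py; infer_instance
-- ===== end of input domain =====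

-- B buckets unique sentences by length in one pass and walks the distinct lengths in descending
-- order instead of A's comparison sort of all sentences plus dedup scan; for max_items ≤ 0 on
-- nonempty input A still returns one sentence while B applies the count as a plain slice (D_).


-- ===== PORT A =====
-- A's 'for sentence in ranked: …' loop, step for step (continue / append / add / break)
def selectLoopA (max_items : Int) : List String → List String → PySem.Set String → List String
  | [], summary, _ => summary
  | s :: rest, summary, seen =>
    if PySem.Set.contains seen s then selectLoopA max_items rest summary seen
    else
      let summary' := summary ++ [s]
      let seen' := PySem.Set.add seen s
      if max_items ≤ PySem.List.len summary' then summary'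
      else selectLoopA max_items rest summary' seen'

def select_summary_py (sentences : List String) (max_items : Int) : List String :=
  let filtered := sentences.filter (fun s => decide ((6 : Int) ≤ PySem.Str.len s))
  let filtered := if filtered.isEmpty then sentences else filtered
  let ranked := PySem.List.sorted filtered (fun s => PySem.Str.len s) true
  let summary := selectLoopA max_items ranked [] PySem.Set.empty
  if summary.isEmpty then PySem.List.slice sentences none (some max_items) else summary

-- ===== PORT B =====
-- Source B's 'for s in filtered: if s not in seen: seen.add(s); buckets.setdefault(len(s), []).append(s)'
-- (setdefault+append = Dict.modify with default [])
def buildBuckets : List String → PySem.Dict Int (List String) → PySem.Set String → PySem.Dict Int (List String)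
  | [], d, _ => d
  | s :: t, d, seen =>
    if PySem.Set.contains seen s then buildBuckets t d seen
    else buildBuckets t (PySem.Dict.modify d (PySem.Str.len s) [] (fun v => v ++ [s]))
           (PySem.Set.add seen s)

def select_summary_py_alt (sentences : List String) (max_items : Int) : List String :=
  let filtered := sentences.filter (fun s => decide ((6 : Int) ≤ PySem.Str.len s))
  let filtered := if filtered.isEmpty then sentences else filtered
  let buckets := buildBuckets filtered PySem.Dict.empty PySem.Set.empty
  -- 'for length in sorted(buckets, reverse=True): summary.extend(buckets[length])'
  -- buckets[length] is exact as getD with default [] because length is always a key here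
  let flat := (PySem.List.sorted (PySem.Dict.keys buckets) (fun x => x) true).foldl
      (fun acc L => acc ++ PySem.Dict.getD buckets L []) []
  let summary := PySem.List.slice flat none (some max_items)
  if summary.isEmpty then PySem.List.slice sentences none (some max_items) else summary

-- ===== PRECONDITION & SPEC =====
-- For max_items ≤ 0 on nonempty sentences A still returns its longest unique sentence (the count
-- check runs only after the first append); B applies the count as an ordinary slice bound (empty
-- for 0, Python negative-slice semantics for negatives), which is what a caller asking for at
-- most max_items items intends.
def D_select_summary_py (sentences : List String) (max_items : Int) : Prop :=
  max_items ≤ 0 ∧ sentences ≠ []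
instance (sentences : List String) (max_items : Int) : Decidable (D_select_summary_py sentences max_items) := by unfold D_select_summary_py; infer_instance

def Spec_select_summary_py (sentences : List String) (max_items : Int) (out : List String) : Prop := ¬ D_select_summary_py sentences max_items → out = select_summary_py_alt sentences max_items
instance (sentences : List String) (max_items : Int) (out : List String) : Decidable (Spec_select_summary_py sentences max_items out) := by unfold Spec_select_summary_py; infer_instance

def pvDiffWitness_select_summary_py : List String × Int := (["abcdef"], 0)
def pvDiffWitnessOut_select_summary_py : (List String) × (List String) := (["abcdef"], [])

-- ===== CLAIM (what is proved, stated in full; the proofs are below) =====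
def Claim_unchanged_select_summary_py : Prop := ∀ (sentences : List String) (max_items : Int), Dom_select_summary_py sentences max_items → Spec_select_summary_py sentences max_items (select_summary_py sentences max_items)
def Claim_changed_select_summary_py : Prop := Dom_select_summary_py (pvDiffWitness_select_summary_py.1) (pvDiffWitness_select_summary_py.2) ∧ D_select_summary_py (pvDiffWitness_select_summary_py.1) (pvDiffWitness_select_summary_py.2) ∧ select_summary_py (pvDiffWitness_select_summary_py.1) (pvDiffWitness_select_summary_py.2) = pvDiffWitnessOut_select_summary_py.1 ∧ select_summary_py_alt (pvDiffWitness_select_summary_py.1) (pvDiffWitness_select_summary_py.2) = pvDiffWitnessOut_select_summary_py.2 ∧ pvDiffWitnessOut_select_summary_py.1 ≠ pvDiffWitnessOut_select_summary_py.2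

-- ===== LEMMAS AND PROOFS =====

-- first-occurrence dedup in a head-recursive form convenient for induction
def dedupF : List String → List String
  | [] => []
  | x :: xs => x :: dedupF (xs.filter (fun y => !(y == x)))
  termination_by l => l.length
  decreasing_by
    simp only [List.length_unattach, List.length_cons]
    exact Nat.lt_succ_of_le (le_trans (List.length_filter_le _ _) (le_of_eq (List.length_attach)))

lemma dedupF_nil : dedupF [] = [] := by simp [dedupF]

lemma dedupF_cons (x : String) (xs : List String) :
    dedupF (x :: xs) = x :: dedupF (xs.filter (fun y => !(y == x))) := by simp [dedupF]

lemma filter_ne_of_not_mem (l : List String) (x : String) (h : x ∉ l) :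
    l.filter (fun y => !(y == x)) = l := by
  apply List.filter_eq_self.mpr
  intro a ha
  simp only [Bool.not_eq_eq_eq_not, Bool.not_true, beq_eq_false_iff_ne, ne_eq]
  exact fun e => h (e ▸ ha)

lemma dedupF_filter (p : String → Bool) (l : List String) :
    dedupF (l.filter p) = (dedupF l).filter p := by
  induction l using dedupF.induct with
  | case1 => simp [dedupF_nil]
  | case2 x xs ih =>
    simp only [List.unattach_filter, List.unattach_attach] at ih
    by_cases hp : p x = true
    · rw [List.filter_cons_of_pos hp, dedupF_cons, dedupF_cons, List.filter_cons_of_pos hp]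
      rw [← ih, List.filter_comm]
    · rw [List.filter_cons_of_neg (by simpa using hp), dedupF_cons, List.filter_cons_of_neg (by simpa using hp)]
      rw [← ih, List.filter_comm]
      congr 1
      apply (filter_ne_of_not_mem _ _ ?_).symm
      simp only [List.mem_filter]
      rintro ⟨_, hx⟩
      exact hp hx

lemma contains_snoc (s : List String) (x a : String) :
    PySem.Set.contains (s ++ [x]) a = (PySem.Set.contains s a || (a == x)) := by
  by_cases h1 : a = x <;> by_cases h2 : a ∈ s <;> simp [PySem.Set.contains, h1, h2]

-- PySem.Set building (hence PySem.List.dedup) agrees with dedupF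
lemma foldl_set_add (l : List String) (s : PySem.Set String) :
    l.foldl PySem.Set.add s = s ++ dedupF (l.filter (fun y => !(PySem.Set.contains s y))) := by
  induction l generalizing s with
  | nil => simp [dedupF_nil]
  | cons x t ih =>
    by_cases hx : PySem.Set.contains s x = true
    · have hmem : x ∈ s := by simpa [PySem.Set.contains] using hx
      have hadd : PySem.Set.add s x = s := by simp [PySem.Set.add, PySem.Set.contains, hmem]
      rw [List.foldl_cons, hadd, ih, List.filter_cons_of_neg (by simp [PySem.Set.contains, hmem])]
    · have hmem : x ∉ s := by simpa [PySem.Set.contains] using hx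
      have hadd : PySem.Set.add s x = s ++ [x] := by simp [PySem.Set.add, PySem.Set.contains, hmem]
      rw [List.foldl_cons, hadd, ih, List.filter_cons_of_pos (by simp [PySem.Set.contains, hmem]), dedupF_cons,
        List.append_assoc, List.singleton_append]
      congr 3
      rw [List.filter_filter]
      apply List.filter_congr
      intro a _
      rw [contains_snoc]
      by_cases h1 : (a == x) = true <;> simp [h1]

lemma dedup_eq_dedupF (l : List String) : PySem.List.dedup l = dedupF l := by
  have h := foldl_set_add l PySem.Set.empty
  simp only [PySem.List.dedup, PySem.Set.ofList]
  rw [h]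
  simp only [PySem.Set.empty, List.nil_append]
  congr 1
  apply List.filter_eq_self.mpr
  intro a _
  simp [PySem.Set.contains]

-- unfolding equations of PySem.List.insertBy in rewrite-friendly form
lemma insertBy_nil (b : String → String → Bool) (x : String) :
    PySem.List.insertBy b x [] = [x] := by rw [PySem.List.insertBy]

lemma insertBy_cons (b : String → String → Bool) (x y : String) (ys : List String) :
    PySem.List.insertBy b x (y :: ys) = if b x y then x :: y :: ys else y :: PySem.List.insertBy b x ys := by
  rw [PySem.List.insertBy]

-- insertion skips a prefix it never goes before
lemma insertBy_skip (b : String → String → Bool) (x : String) :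
    ∀ (A S : List String), (∀ a ∈ A, b x a = false) →
      PySem.List.insertBy b x (A ++ S) = A ++ PySem.List.insertBy b x S := by
  intro A
  induction A with
  | nil => intro S _; simp
  | cons a A' ih =>
    intro S hA
    rw [List.cons_append, insertBy_cons, if_neg (by simp [hA a (by simp)])]
    rw [ih S (fun a' ha' => hA a' (by simp [ha']))]
    simp

-- insertion in front of a block it always goes before
lemma insertBy_front (b : String → String → Bool) (x : String) :
    ∀ (S : List String), (S = [] ∨ b x (S.headI) = true) →
      PySem.List.insertBy b x S = x :: S := by
  intro S hS
  match S with
  | [] => exact insertBy_nil b x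
  | s :: S' =>
    rcases hS with h | h
    · cases h
    · rw [insertBy_cons, if_pos (by simpa using h)]


lemma filter_insertBy_self (before : String → String → Bool) (x : String) (t : List String) :
    (PySem.List.insertBy before x t).filter (fun z => !(z == x)) = t.filter (fun z => !(z == x)) := by
  induction t with
  | nil => simp [insertBy_nil]
  | cons y ys ih =>
    by_cases hb : before x y = true
    · simp [insertBy_cons, hb]
    · rw [insertBy_cons, if_neg (by simp [hb])]
      by_cases hy : (y == x) = true
      · rw [List.filter_cons_of_neg (by simp [hy]), List.filter_cons_of_neg (by simp [hy]), ih]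
      · rw [List.filter_cons_of_pos (by simp [hy]), List.filter_cons_of_pos (by simp [hy]), ih]

lemma filter_insertBy_comm (before : String → String → Bool) (x y : String) (t : List String)
    (hxy : (x == y) = false) (hby : before x y = false) :
    (PySem.List.insertBy before x t).filter (fun z => !(z == y)) =
      PySem.List.insertBy before x (t.filter (fun z => !(z == y))) := by
  induction t with
  | nil => simp [insertBy_nil, hxy]
  | cons z t' ih =>
    by_cases hz : (z == y) = true
    · have hze : z = y := by simpa using hz
      have hbz : before x z = false := by rw [hze]; exact hby
      rw [insertBy_cons, if_neg (by simp [hbz])]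
      rw [List.filter_cons_of_neg (by simp [hz]), ih, List.filter_cons_of_neg (by simp [hz])]
    · by_cases hb : before x z = true
      · have h1 : List.filter (fun z => !(z == y)) (z :: t') = z :: List.filter (fun z => !(z == y)) t' :=
          List.filter_cons_of_pos (by simp [hz])
        have h2 : List.filter (fun z => !(z == y)) (x :: z :: t') = x :: List.filter (fun z => !(z == y)) (z :: t') :=
          List.filter_cons_of_pos (by simp [hxy])
        rw [insertBy_cons, if_pos hb, h2, h1, insertBy_cons, if_pos hb]
      · rw [insertBy_cons, if_neg (by simp [hb])]
        rw [List.filter_cons_of_pos (by simp [hz]), List.filter_cons_of_pos (by simp [hz])]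
        rw [insertBy_cons, if_neg (by simp [hb]), ih]

lemma dedupF_insertBy_mem (x : String) (l : List String)
    (hp : l.Pairwise (fun a b => PySem.Str.len b ≤ PySem.Str.len a)) (hx : x ∈ l) :
    dedupF (PySem.List.insertBy (fun a b => decide (PySem.Str.len b < PySem.Str.len a)) x l) = dedupF l := by
  induction l using dedupF.induct with
  | case1 => cases hx
  | case2 y t ih =>
    simp only [List.unattach_filter, List.unattach_attach] at ih
    by_cases hb : (decide (PySem.Str.len y < PySem.Str.len x)) = true
    · exfalso
      have hlt : PySem.Str.len y < PySem.Str.len x := by simpa using hb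
      rcases List.mem_cons.mp hx with rfl | hxt
      · exact absurd hlt (lt_irrefl _)
      · have := (List.pairwise_cons.mp hp).1 x hxt
        omega
    · rw [insertBy_cons, if_neg hb]
      rw [dedupF_cons, dedupF_cons]
      by_cases hxy : (x == y) = true
      · have : x = y := by simpa using hxy
        subst this
        congr 1
        rw [filter_insertBy_self _ x t]
      · have hxt : x ∈ t := by
          rcases List.mem_cons.mp hx with rfl | h
          · simp at hxy
          · exact h
        congr 1
        rw [filter_insertBy_comm _ x y t (by simpa using hxy) (by simpa using hb)]
        have hxt' : x ∈ t.filter (fun z => !(z == y)) := by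
          simp only [List.mem_filter]
          exact ⟨hxt, by simp [hxy]⟩
        exact ih ((List.pairwise_cons.mp hp).2.filter _) hxt'

lemma dedupF_insertBy_not_mem (before : String → String → Bool) (x : String) (l : List String)
    (hx : x ∉ l) :
    dedupF (PySem.List.insertBy before x l) = PySem.List.insertBy before x (dedupF l) := by
  induction l using dedupF.induct with
  | case1 => simp [insertBy_nil, dedupF_nil, dedupF_cons]
  | case2 y t ih =>
    simp only [List.unattach_filter, List.unattach_attach] at ih
    have hxy : (x == y) = false := by
      simp only [beq_eq_false_iff_ne, ne_eq]
      exact fun e => hx (by simp [e])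
    have hyx : (y == x) = false := by
      simp only [beq_eq_false_iff_ne, ne_eq]
      exact fun e => hx (by simp [e.symm])
    have hxt : x ∉ t := fun h => hx (by simp [h])
    by_cases hb : before x y = true
    · rw [insertBy_cons, if_pos hb, dedupF_cons,
        List.filter_cons_of_pos (by simp [hyx]), filter_ne_of_not_mem t x hxt,
        dedupF_cons, insertBy_cons, if_pos hb]
    · rw [insertBy_cons, if_neg (by simp [hb])]
      rw [dedupF_cons, dedupF_cons]
      rw [filter_insertBy_comm before x y t hxy (by simpa using hb)]
      rw [ih (fun h => hxt (List.mem_filter.mp h).1)]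
      rw [insertBy_cons, if_neg (by simp [hb])]

lemma dedupF_append_not_mem (xs : List String) (x : String) (h : x ∉ xs) :
    dedupF (xs ++ [x]) = dedupF xs ++ [x] := by
  induction xs using dedupF.induct with
  | case1 => simp [dedupF_nil, dedupF_cons]
  | case2 y t ih =>
    simp only [List.unattach_filter, List.unattach_attach] at ih
    have hxy : (x == y) = false := by
      simp only [beq_eq_false_iff_ne, ne_eq]
      exact fun e => h (by simp [e])
    rw [List.cons_append, dedupF_cons, dedupF_cons, List.filter_append]
    rw [show List.filter (fun z => !(z == y)) [x] = [x] by simp [hxy]]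
    rw [ih (fun hm => h (by simp [(List.mem_filter.mp hm).1]))]
    simp

lemma dedupF_append_mem (xs : List String) (x : String) (h : x ∈ xs) :
    dedupF (xs ++ [x]) = dedupF xs := by
  induction xs using dedupF.induct with
  | case1 => cases h
  | case2 y t ih =>
    simp only [List.unattach_filter, List.unattach_attach] at ih
    rw [List.cons_append, dedupF_cons, dedupF_cons, List.filter_append]
    by_cases hxy : (x == y) = true
    · rw [show List.filter (fun z => !(z == y)) [x] = [] by simp [hxy]]
      simp
    · have hxt : x ∈ t := by
        rcases List.mem_cons.mp h with rfl | h'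
        · simp at hxy
        · exact h'
      rw [show List.filter (fun z => !(z == y)) [x] = [x] by simp [hxy]]
      rw [ih (List.mem_filter.mpr ⟨hxt, by simp [hxy]⟩)]

-- dedup commutes with the stable descending sort by length
lemma dedupF_sorted (l : List String) :
    dedupF (PySem.List.sorted l (fun s => PySem.Str.len s) true) =
      PySem.List.sorted (dedupF l) (fun s => PySem.Str.len s) true := by
  induction l using List.reverseRecOn with
  | nil => simp [PySem.List.sorted, dedupF_nil]
  | append_singleton xs x ih =>
    have hs : ∀ (m : List String), PySem.List.sorted (m ++ [x]) (fun s => PySem.Str.len s) true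
        = PySem.List.insertBy (fun a b => decide (PySem.Str.len b < PySem.Str.len a)) x
            (PySem.List.sorted m (fun s => PySem.Str.len s) true) := by
      intro m
      rw [PySem.List.sorted_rev_eq_foldl_insertBy, PySem.List.sorted_rev_eq_foldl_insertBy,
        List.foldl_append, List.foldl_cons, List.foldl_nil]
    rw [hs xs]
    by_cases hx : x ∈ xs
    · rw [dedupF_insertBy_mem x _ (PySem.List.sorted_pairwise_rev xs _)
        ((PySem.List.mem_sorted _ _ _ _).mpr hx), ih, dedupF_append_mem xs x hx]
    · rw [dedupF_insertBy_not_mem _ x _ (fun h => hx ((PySem.List.mem_sorted _ _ _ _).mp h)), ih,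
        dedupF_append_not_mem xs x hx, hs (dedupF xs)]

-- A's loop returns the (max_items − |summary|)-prefix of the unseen part of the deduplicated rest
lemma selectLoopA_eq (m : Int) (n : Nat) : ∀ (rest : List String), rest.length ≤ n →
    ∀ (summary : List String) (seen : PySem.Set String), (summary.length : Int) < m →
    selectLoopA m rest summary seen =
      summary ++ ((dedupF rest).filter (fun y => !(PySem.Set.contains seen y))).take (m.toNat - summary.length) := by
  induction n with
  | zero =>
    intro rest hlen summary seen _
    rw [List.length_eq_zero_iff.mp (Nat.le_zero.mp hlen)]
    simp [selectLoopA, dedupF_nil]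
  | succ n ih =>
    intro rest hlen summary seen hlt
    match rest with
    | [] => simp [selectLoopA, dedupF_nil]
    | s :: t =>
      have hlen' : t.length ≤ n := by simpa using hlen
      have hkpos : 1 ≤ m.toNat - summary.length := by omega
      rw [dedupF_cons]
      by_cases hc : PySem.Set.contains seen s = true
      · have hcm : s ∈ seen := by simpa [PySem.Set.contains] using hc
        rw [show selectLoopA m (s :: t) summary seen = selectLoopA m t summary seen by
          simp [selectLoopA, hcm]]
        rw [ih t hlen' summary seen hlt]
        congr 2
        rw [List.filter_cons_of_neg (by simp [hcm]), dedupF_filter, List.filter_filter]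
        apply List.filter_congr
        intro a _
        by_cases has : (a == s) = true
        · have : a = s := by simpa using has
          simp [this, hcm]
        · simp [has]
      · have hcm : s ∉ seen := fun h => hc (by simpa [PySem.Set.contains] using h)
        rw [List.filter_cons_of_pos (by simp [hcm]), List.take_cons hkpos]
        rw [show selectLoopA m (s :: t) summary seen =
            (if m ≤ PySem.List.len (summary ++ [s]) then summary ++ [s]
             else selectLoopA m t (summary ++ [s]) (PySem.Set.add seen s)) by
          simp [selectLoopA, hcm]]
        by_cases hstop : m ≤ PySem.List.len (summary ++ [s])
        · rw [if_pos hstop]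
          have : m.toNat - summary.length - 1 = 0 := by
            simp [PySem.List.len_eq] at hstop
            omega
          rw [this]
          simp
        · rw [if_neg hstop]
          have hlt' : ((summary ++ [s]).length : Int) < m := by
            simp [PySem.List.len_eq] at hstop
            simpa using hstop
          rw [ih t hlen' (summary ++ [s]) (PySem.Set.add seen s) hlt']
          have hadd : PySem.Set.add seen s = seen ++ [s] := by
            simp [PySem.Set.add, PySem.Set.contains, hcm]
          rw [hadd]
          rw [show ((dedupF t).filter (fun y => !(PySem.Set.contains (seen ++ [s]) y)))
              = ((dedupF (t.filter (fun y => !(y == s)))).filter (fun y => !(PySem.Set.contains seen y))) by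
            rw [dedupF_filter, List.filter_filter]
            apply List.filter_congr
            intro a _
            rw [contains_snoc]
            by_cases h1 : (a == s) = true <;> simp [h1]]
          have hsub : m.toNat - (summary ++ [s]).length = m.toNat - summary.length - 1 := by
            simp only [List.length_append, List.length_cons, List.length_nil]
            omega
          rw [hsub, List.append_assoc, List.singleton_append]

-- A's summary computation equals a slice of the stable descending sort of the dedup, for m ≥ 1
lemma core_eq (F : List String) (m : Int) (h : 1 ≤ m) :
    selectLoopA m (PySem.List.sorted F (fun s => PySem.Str.len s) true) [] PySem.Set.empty
      = PySem.List.slice (PySem.List.sorted (PySem.List.dedup F) (fun s => PySem.Str.len s) true) none (some m) := by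
  rw [selectLoopA_eq m (PySem.List.sorted F (fun s => PySem.Str.len s) true).length
    (PySem.List.sorted F (fun s => PySem.Str.len s) true) le_rfl [] PySem.Set.empty (by simpa using h)]
  rw [PySem.List.slice_to _ (by omega)]
  simp only [List.nil_append, List.length_nil, Nat.sub_zero]
  rw [show ((dedupF (PySem.List.sorted F (fun s => PySem.Str.len s) true)).filter
      (fun y => !(PySem.Set.contains PySem.Set.empty y))) = dedupF (PySem.List.sorted F (fun s => PySem.Str.len s) true) from
    List.filter_eq_self.mpr (fun a _ => by simp [PySem.Set.contains, PySem.Set.empty])]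
  rw [dedupF_sorted, dedup_eq_dedupF]


-- ===== B-side lemmas: the bucket dict =====

-- the bucket loop once the seen-filter has been pulled out
def bAdd (u : List String) (d : PySem.Dict Int (List String)) : PySem.Dict Int (List String) :=
  u.foldl (fun d s => PySem.Dict.modify d (PySem.Str.len s) [] (fun v => v ++ [s])) d

-- buildBuckets is bAdd over the first occurrences of the not-yet-seen sentences
lemma buildBuckets_eq (l : List String) : ∀ (d : PySem.Dict Int (List String)) (seen : PySem.Set String),
    buildBuckets l d seen = bAdd (dedupF (l.filter (fun y => !(PySem.Set.contains seen y)))) d := by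
  induction l with
  | nil => intro d seen; simp [buildBuckets, bAdd, dedupF_nil]
  | cons s t ih =>
    intro d seen
    by_cases hc : PySem.Set.contains seen s = true
    · have hcm : s ∈ seen := by simpa [PySem.Set.contains] using hc
      rw [show buildBuckets (s :: t) d seen = buildBuckets t d seen by simp [buildBuckets, hcm],
        ih, List.filter_cons_of_neg (by simp [hcm])]
    · have hcm : s ∉ seen := fun h => hc (by simpa [PySem.Set.contains] using h)
      rw [show buildBuckets (s :: t) d seen
          = buildBuckets t (PySem.Dict.modify d (PySem.Str.len s) [] (fun v => v ++ [s])) (PySem.Set.add seen s) by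
        simp [buildBuckets, hcm], ih]
      rw [List.filter_cons_of_pos (by simp [hcm]), dedupF_cons]
      rw [show bAdd (s :: dedupF ((t.filter (fun y => !(PySem.Set.contains seen y))).filter (fun y => !(y == s)))) d
          = bAdd (dedupF ((t.filter (fun y => !(PySem.Set.contains seen y))).filter (fun y => !(y == s))))
              (PySem.Dict.modify d (PySem.Str.len s) [] (fun v => v ++ [s])) from rfl]
      congr 1
      have hadd : PySem.Set.add seen s = seen ++ [s] := by
        simp [PySem.Set.add, PySem.Set.contains, hcm]
      rw [hadd, List.filter_filter]
      congr 1
      apply List.filter_congr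
      intro a _
      rw [contains_snoc]
      by_cases h1 : (a == s) = true <;> simp [h1]

-- each bucket holds exactly the sentences of its length, in order
lemma bAdd_getD (u : List String) : ∀ (d : PySem.Dict Int (List String)) (L : Int),
    PySem.Dict.getD (bAdd u d) L [] = PySem.Dict.getD d L [] ++ u.filter (fun s => decide (PySem.Str.len s = L)) := by
  induction u with
  | nil => intro d L; simp [bAdd]
  | cons s t ih =>
    intro d L
    rw [show bAdd (s :: t) d = bAdd t (PySem.Dict.modify d (PySem.Str.len s) [] (fun v => v ++ [s])) from rfl, ih]
    rw [PySem.Dict.getD_modify]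
    by_cases h : L = PySem.Str.len s
    · subst h
      rw [if_pos rfl, List.filter_cons_of_pos (by simp)]
      simp
    · rw [if_neg h, List.filter_cons_of_neg (by simp; exact fun e => h e.symm)]

-- the stable descending sort splits off the sentences of maximal length
lemma splitMax (k : Int) (u : List String) (h : ∀ s ∈ u, PySem.Str.len s ≤ k) :
    PySem.List.sorted u (fun s => PySem.Str.len s) true =
      u.filter (fun s => decide (PySem.Str.len s = k)) ++
        PySem.List.sorted (u.filter (fun s => !decide (PySem.Str.len s = k))) (fun s => PySem.Str.len s) true := by
  induction u using List.reverseRecOn with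
  | nil => simp [PySem.List.sorted_rev_eq_foldl_insertBy]
  | append_singleton xs x ih =>
    have hxs : ∀ s ∈ xs, PySem.Str.len s ≤ k := fun s hs => h s (by simp [hs])
    have hs : ∀ (m : List String), PySem.List.sorted (m ++ [x]) (fun s => PySem.Str.len s) true
        = PySem.List.insertBy (fun a b => decide (PySem.Str.len b < PySem.Str.len a)) x
            (PySem.List.sorted m (fun s => PySem.Str.len s) true) := by
      intro m
      rw [PySem.List.sorted_rev_eq_foldl_insertBy, PySem.List.sorted_rev_eq_foldl_insertBy,
        List.foldl_append, List.foldl_cons, List.foldl_nil]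
    have hAk : ∀ a ∈ xs.filter (fun s => decide (PySem.Str.len s = k)), PySem.Str.len a = k := by
      intro a ha
      simpa using (List.mem_filter.mp ha).2
    have hSlt : ∀ s ∈ PySem.List.sorted (xs.filter (fun s => !decide (PySem.Str.len s = k))) (fun s => PySem.Str.len s) true,
        PySem.Str.len s < k := by
      intro s hsm
      have hm := (PySem.List.mem_sorted _ _ _ _).mp hsm
      have h1 := hxs s (List.mem_filter.mp hm).1
      have h2 : ¬ (PySem.Str.len s = k) := by simpa using (List.mem_filter.mp hm).2
      omega
    rw [hs xs, ih hxs]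
    by_cases hx : PySem.Str.len x = k
    · have hx' : (x.length : Int) = k := hx
      rw [insertBy_skip _ x _ _ (fun a ha => by rw [hAk a ha, hx]; simp)]
      rw [insertBy_front _ x _ ?front]
      case front =>
        match hS : PySem.List.sorted (xs.filter (fun s => !decide (PySem.Str.len s = k))) (fun s => PySem.Str.len s) true with
        | [] => exact Or.inl rfl
        | s :: S' =>
          refine Or.inr ?_
          have hlt := hSlt s (by rw [hS]; simp)
          simp only [List.headI, hx]
          simpa using hlt
      rw [List.filter_append, List.filter_append]
      rw [show List.filter (fun s => decide (PySem.Str.len s = k)) [x] = [x] by simp [hx']]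
      rw [show List.filter (fun s => !decide (PySem.Str.len s = k)) [x] = [] by simp [hx']]
      rw [List.append_nil, List.append_assoc, List.singleton_append]
    · have hx' : ¬((x.length : Int) = k) := hx
      have hle : PySem.Str.len x ≤ k := h x (by simp)
      rw [insertBy_skip _ x _ _ (fun a ha => by
        rw [hAk a ha]
        simp only [decide_eq_false_iff_not, not_lt]
        exact hle)]
      rw [← hs (xs.filter (fun s => !decide (PySem.Str.len s = k)))]
      rw [List.filter_append, List.filter_append]
      rw [show List.filter (fun s => decide (PySem.Str.len s = k)) [x] = [] by simp [hx']]
      rw [show List.filter (fun s => !decide (PySem.Str.len s = k)) [x] = [x] by simp [hx']]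
      rw [List.append_nil]

-- concatenating the buckets along the strictly decreasing list of all lengths IS the stable sort
lemma bucketSort : ∀ (ks : List Int) (u : List String), ks.Pairwise (fun a b => b < a) →
    (∀ s ∈ u, PySem.Str.len s ∈ ks) →
    ks.flatMap (fun L => u.filter (fun s => decide (PySem.Str.len s = L)))
      = PySem.List.sorted u (fun s => PySem.Str.len s) true := by
  intro ks
  induction ks with
  | nil =>
    intro u _ hmem
    have : u = [] := List.eq_nil_iff_forall_not_mem.mpr (fun s hs => by simpa using hmem s hs)
    subst this
    simp [PySem.List.sorted_rev_eq_foldl_insertBy]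
  | cons k ks ih =>
    intro u hp hmem
    have hks : ∀ b ∈ ks, b < k := (List.pairwise_cons.mp hp).1
    have hmax : ∀ s ∈ u, PySem.Str.len s ≤ k := by
      intro s hsu
      rcases List.mem_cons.mp (hmem s hsu) with he | hin
      · omega
      · exact le_of_lt (hks _ hin)
    rw [List.flatMap_cons, splitMax k u hmax]
    congr 1
    rw [← ih (u.filter (fun s => !decide (PySem.Str.len s = k))) (List.pairwise_cons.mp hp).2 ?memtail]
    case memtail =>
      intro s hsm
      have h1 := hmem s (List.mem_filter.mp hsm).1
      have h2 : ¬ (PySem.Str.len s = k) := by simpa using (List.mem_filter.mp hsm).2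
      rcases List.mem_cons.mp h1 with he | hin
      · exact absurd he h2
      · exact hin
    apply List.flatMap_congr
    intro L hL
    rw [List.filter_filter]
    apply List.filter_congr
    intro a _
    have hLk : ¬ (L = k) := by have := hks L hL; omega
    simp
    exact fun he => he ▸ hLk

-- B's flattening of the buckets is the stable descending sort of the dedup
lemma flat_eq (F : List String) :
    (PySem.List.sorted (PySem.Dict.keys (buildBuckets F PySem.Dict.empty PySem.Set.empty)) (fun x => x) true).foldl
        (fun acc L => acc ++ PySem.Dict.getD (buildBuckets F PySem.Dict.empty PySem.Set.empty) L []) []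
      = PySem.List.sorted (PySem.List.dedup F) (fun s => PySem.Str.len s) true := by
  have hF : F.filter (fun y => !(PySem.Set.contains PySem.Set.empty y)) = F :=
    List.filter_eq_self.mpr (fun a _ => by simp [PySem.Set.contains, PySem.Set.empty])
  have hbb : buildBuckets F PySem.Dict.empty PySem.Set.empty = bAdd (dedupF F) PySem.Dict.empty := by
    rw [buildBuckets_eq, hF]
  have hkeys : PySem.Dict.keys (bAdd (dedupF F) PySem.Dict.empty)
      = PySem.Set.ofList ((dedupF F).map (fun s => PySem.Str.len s)) := by
    rw [show bAdd (dedupF F) PySem.Dict.empty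
        = (dedupF F).foldl (fun d s => PySem.Dict.modify d (PySem.Str.len s) [] ((fun s => fun v => v ++ [s]) s)) PySem.Dict.empty from rfl]
    rw [PySem.Dict.keys_foldl_modify_key]
    simp [PySem.Set.update_nil_left]
    rfl
  rw [hbb, PySem.List.foldl_append_eq_flatMap, List.nil_append, hkeys]
  have hgetD : ∀ L, PySem.Dict.getD (bAdd (dedupF F) PySem.Dict.empty) L []
      = (dedupF F).filter (fun s => decide (PySem.Str.len s = L)) := by
    intro L
    rw [bAdd_getD]
    simp
  rw [List.flatMap_congr (fun L _ => hgetD L)]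
  rw [dedup_eq_dedupF]
  apply bucketSort
  · have h1 := PySem.List.sorted_pairwise_rev (PySem.Set.ofList ((dedupF F).map (fun s => PySem.Str.len s))) (fun x : Int => x)
    have h2 : (PySem.List.sorted (PySem.Set.ofList ((dedupF F).map (fun s => PySem.Str.len s))) (fun x : Int => x) true).Nodup := by
      apply (List.Perm.nodup_iff (PySem.List.sorted_perm _ _ _)).mpr
      exact PySem.Set.nodup_ofList _
    exact (h1.and h2).imp (fun hab => lt_of_le_of_ne hab.1 (Ne.symm hab.2))
  · intro s hsu
    rw [PySem.List.mem_sorted]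
    exact (PySem.Set.mem_ofList _ _).mpr (List.mem_map.mpr ⟨s, hsu, rfl⟩)

-- ===== VERDICT (by name: the statement is the Claim_ definition above) =====
theorem select_summary_py_spec : Claim_unchanged_select_summary_py := by
  intro sentences m _ hnd
  unfold D_select_summary_py at hnd
  by_cases hm : 1 ≤ m
  · unfold select_summary_py select_summary_py_alt
    simp only []
    rw [core_eq _ m hm, flat_eq]
  · have hse : sentences = [] := by
      by_contra hne
      exact hnd ⟨by omega, hne⟩
    subst hse
    simp [select_summary_py, select_summary_py_alt, selectLoopA, buildBuckets,
      PySem.List.sorted_rev_eq_foldl_insertBy, PySem.Dict.empty]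

theorem select_summary_py_changed : Claim_changed_select_summary_py := by
  unfold Claim_changed_select_summary_py; decide
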